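-- pv_equiv track=rewrite | github.com/Abigail-Velarde/-Computational-Thinking-for-Engineering- | MATRICES 03.py | matriz_secuencia_columna
-- ===== SOURCE A (Python) =====
-- def matriz_secuencia_columna(n):
--     matriz=[]
--     for i in range(n):
--         lista=[]
--         for j in range(n):
--             lista.append(j*n+i)
--         matriz.append(lista)
--     return matriz
-- ===== SOURCE B (Python) =====
-- def matriz_secuencia_columna(n):
--     base = [[i * n + j for j in range(n)] for i in range(n)]
--     return [list(col) for col in zip(*base)]
-- ===== Notes on version B (the rewrite author's own statement) =====
-- stated objective: alternative
-- what changed: B builds the row-sequential matrix base[i][j]=i*n+j and returns its transpose via zip(*base), instead of computing the column-sequential entries j*n+i directly in nested loops.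
import Mathlib
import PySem

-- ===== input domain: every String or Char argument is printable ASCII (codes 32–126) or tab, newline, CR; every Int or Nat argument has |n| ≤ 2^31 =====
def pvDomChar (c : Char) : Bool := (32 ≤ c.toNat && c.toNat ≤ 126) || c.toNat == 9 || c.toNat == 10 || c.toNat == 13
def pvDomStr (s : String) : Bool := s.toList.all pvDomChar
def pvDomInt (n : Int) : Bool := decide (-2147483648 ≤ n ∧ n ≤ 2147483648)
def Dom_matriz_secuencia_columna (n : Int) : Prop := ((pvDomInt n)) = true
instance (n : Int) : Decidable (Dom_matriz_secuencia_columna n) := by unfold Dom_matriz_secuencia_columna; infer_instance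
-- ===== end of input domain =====

-- B builds the row-sequential matrix base[i][j] = i*n+j and returns its transpose (zip(*base)),
-- instead of computing the column-sequential entries directly; alternative decomposition, same cost.

-- ===== PORT A =====
def matriz_secuencia_columna (n : Int) : List (List Int) :=
  (PySem.List.pyRange 0 n 1).foldl (fun matriz i =>
    matriz ++ [(PySem.List.pyRange 0 n 1).foldl (fun lista j => lista ++ [j * n + i]) []]) []

-- ===== PORT B =====
-- zip(*rows): emit the heads of all rows, then recurse on the tails, stopping as soon as
-- any row is exhausted (zip's shortest-input rule); fuel = length of the first row bounds
-- the recursion and is never the stopping reason before a row empties.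
def pvZipStar : Nat → List (List Int) → List (List Int)
  | _, [] => []
  | 0, _ :: _ => []
  | fuel + 1, rows =>
      if rows.any (·.isEmpty) then []
      else (rows.map (fun l => l.headD 0)) :: pvZipStar fuel (rows.map (·.tail))

def matriz_secuencia_columna_alt (n : Int) : List (List Int) :=
  let base := (PySem.List.pyRange 0 n 1).map (fun i => (PySem.List.pyRange 0 n 1).map (fun j => i * n + j))
  -- [list(col) for col in zip(*base)]: list(col) is the tuple→list conversion, identity here
  (pvZipStar (base.headD []).length base).map (fun col => col)

-- ===== PRECONDITION & SPEC =====
def Spec_matriz_secuencia_columna (n : Int) (out : List (List Int)) : Prop := out = matriz_secuencia_columna_alt n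
instance (n : Int) (out : List (List Int)) : Decidable (Spec_matriz_secuencia_columna n out) := by unfold Spec_matriz_secuencia_columna; infer_instance

-- ===== CLAIM (what is proved, stated in full; the proofs are below) =====
def Claim_equal_matriz_secuencia_columna : Prop := ∀ (n : Int), Dom_matriz_secuencia_columna n → Spec_matriz_secuencia_columna n (matriz_secuencia_columna n)

-- ===== LEMMAS AND PROOFS =====

lemma pvZipStar_zero (xs : List (List Int)) : pvZipStar 0 xs = [] := by
  cases xs <;> rfl

lemma portA_eq_map (n : Int) : matriz_secuencia_columna n =
    (PySem.List.pyRange 0 n 1).map (fun i => (PySem.List.pyRange 0 n 1).map (fun j => j * n + i)) := by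
  simp only [matriz_secuencia_columna, PySem.List.foldl_append_singleton_eq_map, List.nil_append]

lemma pvZipStar_transpose (n : Int) : ∀ (f : Nat) (k : Int) (is : List Int),
    is ≠ [] → (n - k).toNat = f →
    pvZipStar f (is.map (fun i => (PySem.List.pyRange k n 1).map (fun j => i * n + j)))
    = (PySem.List.pyRange k n 1).map (fun j => is.map (fun i => i * n + j)) := by
  intro f
  induction f with
  | zero =>
    intro k is _ hf
    have hle : n ≤ k := by omega
    rw [PySem.List.pyRange_one_eq_nil hle]
    simp [pvZipStar_zero]
  | succ f ih =>
    intro k is hne hf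
    have hk : k < n := by omega
    obtain ⟨a, as, rfl⟩ := List.exists_cons_of_ne_nil hne
    rw [PySem.List.pyRange_one_cons hk]
    have hrec := ih (k + 1) (a :: as) (by simp) (by omega)
    simp only [List.map_cons] at hrec ⊢
    simp [pvZipStar, Function.comp] at hrec ⊢
    exact hrec

-- ===== VERDICT (by name: the statement is the Claim_ definition above) =====
theorem matriz_secuencia_columna_spec : Claim_equal_matriz_secuencia_columna := by
  intro n _
  unfold Spec_matriz_secuencia_columna
  rw [portA_eq_map]
  by_cases hn : n ≤ 0
  · rw [matriz_secuencia_columna_alt]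
    simp [PySem.List.pyRange_one_eq_nil hn, pvZipStar_zero]
  · replace hn : 0 < n := by omega
    rw [matriz_secuencia_columna_alt]
    have hne : PySem.List.pyRange 0 n 1 ≠ [] := by
      rw [PySem.List.pyRange_one_cons hn]; simp
    have hhead : (((PySem.List.pyRange 0 n 1).map (fun i => (PySem.List.pyRange 0 n 1).map (fun j => i * n + j))).headD []).length = (n - 0).toNat := by
      rw [PySem.List.pyRange_one_cons hn]
      simp [PySem.List.length_pyRange_one]
      omega
    simp only [hhead]
    rw [pvZipStar_transpose n (n - 0).toNat 0 (PySem.List.pyRange 0 n 1) hne rfl]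
    simp
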